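-- pv_equiv track=rewrite | github.com/rjwalters/kicad-tools | src/kicad_tools/analysis/net_status.py | _pad_layer_matches_zone
-- ===== SOURCE A (Python) =====
-- def _pad_layer_matches_zone(
--
--     pad_layers: list[str],
--     zone_layer: str,
-- ) -> bool:
--     """Check if a pad exists on the same layer as a zone.
--
--     Handles wildcard layers like "*.Cu" which match any copper layer.
--
--     Args:
--         pad_layers: List of layers the pad exists on
--         zone_layer: Layer the zone is on (e.g., "In1.Cu", "B.Cu")
--
--     Returns:
--         True if the pad and zone share a layer
--     """
--     for pad_layer in pad_layers:
--         # Exact match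
--         if pad_layer == zone_layer:
--             return True
--         # Wildcard match: "*.Cu" matches any copper layer
--         if pad_layer == "*.Cu" and zone_layer.endswith(".Cu"):
--             return True
--         # Also handle "*.Mask" style wildcards
--         if pad_layer.startswith("*.") and zone_layer.endswith(pad_layer[1:]):
--             return True
--     return False
-- ===== SOURCE B (Python) =====
-- def _pad_layer_matches_zone(
--     pad_layers: list[str],
--     zone_layer: str,
-- ) -> bool:
--     """Check if a pad exists on the same layer as a zone (wildcards like "*.Cu" supported).
--
--     Builds, once, the finite set of pad-layer strings that match zone_layer
--     (the zone layer itself plus every '*'+suffix wildcard it satisfies),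
--     then tests the pads by set membership.
--     """
--     accepted = {zone_layer}
--     accepted.update('*' + zone_layer[i:] for i, ch in enumerate(zone_layer) if ch == '.')
--     return any(p in accepted for p in pad_layers)
-- ===== Notes on version B (the rewrite author's own statement) =====
-- stated objective: alternative
-- what changed: Instead of testing each pad with per-element equality/startswith/endswith checks, B precomputes from zone_layer the finite set of all accepted pad strings (the zone itself plus '*'+suffix for every '.'-position) and answers by set membership over the pads.
import Mathlib
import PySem

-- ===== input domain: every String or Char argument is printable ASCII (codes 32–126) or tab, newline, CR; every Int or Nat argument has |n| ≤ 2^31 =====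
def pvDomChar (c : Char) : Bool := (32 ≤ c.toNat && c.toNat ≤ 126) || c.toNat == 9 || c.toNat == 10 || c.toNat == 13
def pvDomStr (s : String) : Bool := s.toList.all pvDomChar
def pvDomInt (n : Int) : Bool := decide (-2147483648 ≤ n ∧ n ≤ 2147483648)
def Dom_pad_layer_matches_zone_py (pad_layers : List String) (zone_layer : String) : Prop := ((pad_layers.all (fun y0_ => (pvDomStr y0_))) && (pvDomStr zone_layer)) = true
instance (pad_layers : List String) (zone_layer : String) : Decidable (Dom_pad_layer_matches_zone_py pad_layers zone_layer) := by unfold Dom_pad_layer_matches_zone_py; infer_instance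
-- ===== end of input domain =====

-- ===== PORT A =====
-- B rewrites the per-pad predicate scan as one precomputed set of accepted layer strings plus membership tests (alternative decomposition, same results).
def pad_layer_matches_zone_py (pad_layers : List String) (zone_layer : String) : Bool :=
  -- for pad_layer in pad_layers: three checks in order, early return True; else False
  pad_layers.any (fun pad_layer =>
    if pad_layer == zone_layer then true
    else if pad_layer == "*.Cu" && PySem.Str.endswith zone_layer ".Cu" then true
    else if PySem.Str.startswith pad_layer "*." &&
            PySem.Str.endswith zone_layer (PySem.Str.slice pad_layer (some 1) none) then true
    else false)

-- ===== PORT B =====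
-- accepted = {zone_layer}; accepted.update('*' + zone_layer[i:] for i, ch in enumerate(zone_layer) if ch == '.')
def pad_layer_matches_zone_py_alt (pad_layers : List String) (zone_layer : String) : Bool :=
  let accepted : PySem.Set String :=
    PySem.Set.update (PySem.Set.ofList [zone_layer])
      (((PySem.List.enumerate zone_layer.toList 0).filter (fun p => p.2 == '.')).map
        (fun p => String.ofList ('*' :: PySem.List.slice zone_layer.toList (some p.1) none)))
  pad_layers.any (fun p => PySem.Set.contains accepted p)

-- ===== PRECONDITION & SPEC =====
def Spec_pad_layer_matches_zone_py (pad_layers : List String) (zone_layer : String) (out : Bool) : Prop := out = pad_layer_matches_zone_py_alt pad_layers zone_layer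
instance (pad_layers : List String) (zone_layer : String) (out : Bool) : Decidable (Spec_pad_layer_matches_zone_py pad_layers zone_layer out) := by unfold Spec_pad_layer_matches_zone_py; infer_instance

-- ===== CLAIM (what is proved, stated in full; the proofs are below) =====
def Claim_equal_pad_layer_matches_zone_py : Prop := ∀ (pad_layers : List String) (zone_layer : String), Dom_pad_layer_matches_zone_py pad_layers zone_layer → Spec_pad_layer_matches_zone_py pad_layers zone_layer (pad_layer_matches_zone_py pad_layers zone_layer)

-- ===== LEMMAS AND PROOFS =====

-- Membership in B's accepted set, characterised on the input.
theorem mem_accepted_iff (zone_layer p : String) :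
    (p ∈ PySem.Set.update (PySem.Set.ofList [zone_layer])
      (((PySem.List.enumerate zone_layer.toList 0).filter (fun q => q.2 == '.')).map
        (fun q => String.ofList ('*' :: PySem.List.slice zone_layer.toList (some q.1) none)))) ↔
    (p = zone_layer ∨ ∃ k : Nat, ∃ h : k < zone_layer.toList.length,
        zone_layer.toList[k] = '.' ∧ p.toList = '*' :: zone_layer.toList.drop k) := by
  rw [PySem.Set.mem_update]
  simp only [PySem.Set.mem_ofList, List.mem_singleton, List.mem_map, List.mem_filter,
    PySem.List.mem_enumerate_iff]
  apply or_congr Iff.rfl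
  constructor
  · rintro ⟨a, ⟨⟨k, hk, rfl⟩, hdot⟩, rfl⟩
    refine ⟨k, hk, beq_iff_eq.mp (by simpa using hdot), ?_⟩
    rw [String.toList_ofList]
    congr 1
    show PySem.List.slice zone_layer.toList (some ((0 : Int) + (k : Int))) none = _
    rw [zero_add, PySem.List.slice_from_natCast]
  · rintro ⟨k, hk, hdot, hq⟩
    refine ⟨((0 : Int) + (k : Int), zone_layer.toList[k]), ⟨⟨k, hk, rfl⟩, by simpa using hdot⟩, ?_⟩
    rw [String.ext_iff, String.toList_ofList, hq]
    congr 2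
    rw [zero_add, PySem.List.slice_from_natCast]

-- The "*."-wildcard branch of A, characterised on the character lists.
theorem wild_iff (q l : List Char) :
    (['*', '.'] <+: q ∧ q.tail <:+ l) ↔
    (∃ k : Nat, ∃ h : k < l.length, l[k] = '.' ∧ q = '*' :: l.drop k) := by
  constructor
  · rintro ⟨⟨t, rfl⟩, hs⟩
    obtain ⟨u, hu⟩ := hs
    subst hu
    refine ⟨u.length, by simp, ?_, ?_⟩
    · rw [List.getElem_append_right (le_refl u.length)]
      simp
    · rw [List.drop_left]
      rfl
  · rintro ⟨k, h, hdot, rfl⟩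
    refine ⟨?_, by simpa using List.drop_suffix k l⟩
    rw [List.drop_eq_getElem_cons h, hdot]
    exact ⟨l.drop (k + 1), rfl⟩

-- A's three-branch predicate reduces to exact match or a "*."-wildcard suffix match.
theorem predA_iff (zone_layer p : String) :
    ((if p == zone_layer then true
      else if p == "*.Cu" && PySem.Str.endswith zone_layer ".Cu" then true
      else if PySem.Str.startswith p "*." &&
              PySem.Str.endswith zone_layer (PySem.Str.slice p (some 1) none) then true
      else false) = true) ↔
    (p = zone_layer ∨ ∃ k : Nat, ∃ h : k < zone_layer.toList.length,
        zone_layer.toList[k] = '.' ∧ p.toList = '*' :: zone_layer.toList.drop k) := by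
  have tri : ∀ a b c : Bool,
      (if a = true then true else if b = true then true else if c = true then true else false) =
      (a || b || c) := by decide
  have hends : ∀ t : String, PySem.Str.endswith zone_layer t = true ↔ t.toList <:+ zone_layer.toList := by
    intro t
    rw [PySem.Str.endswith_eq]
    exact PySem.Chars.endswith_iff _ _
  have hslice : (PySem.Str.slice p (some 1) none).toList = p.toList.tail := by
    simp [PySem.List.slice_from_one]
  rw [tri]
  simp only [Bool.or_eq_true, Bool.and_eq_true, beq_iff_eq]
  constructor
  · rintro ((h | ⟨rfl, hz⟩) | ⟨hs, he⟩)
    · exact Or.inl h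
    · refine Or.inr ((wild_iff "*.Cu".toList zone_layer.toList).mp ⟨by decide, ?_⟩)
      have : (".Cu" : String).toList <:+ zone_layer.toList := (hends _).mp hz
      simpa using this
    · refine Or.inr ((wild_iff p.toList zone_layer.toList).mp ⟨?_, ?_⟩)
      · have := hs
        rw [PySem.Str.startswith_eq] at this
        have h2 := (PySem.Chars.startswith_iff _ _).mp this
        simpa using h2
      · have := (hends _).mp he
        rwa [hslice] at this
  · rintro (h | hw)
    · exact Or.inl (Or.inl h)
    · obtain ⟨hpre, hsuf⟩ := (wild_iff p.toList zone_layer.toList).mpr hw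
      refine Or.inr ⟨?_, ?_⟩
      · rw [PySem.Str.startswith_eq]
        apply (PySem.Chars.startswith_iff _ _).mpr
        simpa using hpre
      · rw [hends, hslice]
        exact hsuf

-- ===== VERDICT (by name: the statement is the Claim_ definition above) =====
theorem pad_layer_matches_zone_py_spec : Claim_equal_pad_layer_matches_zone_py := by
  intro pad_layers zone_layer _
  unfold Spec_pad_layer_matches_zone_py pad_layer_matches_zone_py pad_layer_matches_zone_py_alt
  rw [Bool.eq_iff_iff]
  simp only [List.any_eq_true]
  constructor
  · rintro ⟨p, hp, hpred⟩
    exact ⟨p, hp, by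
      simp only [PySem.Set.contains_eq_listContains, List.contains_iff_mem]
      exact (mem_accepted_iff zone_layer p).2 ((predA_iff zone_layer p).1 hpred)⟩
  · rintro ⟨p, hp, hmem⟩
    refine ⟨p, hp, ?_⟩
    refine (predA_iff zone_layer p).2 ((mem_accepted_iff zone_layer p).1 ?_)
    simpa using hmem
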